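-- pv_equiv track=rewrite | github.com/fkie-cad/mcritweb | mcritweb/db.py | _enforce_score_pair_ordering
-- ===== SOURCE A (Python) =====
-- def _enforce_score_pair_ordering(active_positions):
--     """Ensure that score pairs are placed next to each other in result_family_table"""
--     # Convert to a list of column names for easier manipulation
--     columns = [column for position, column in active_positions]
--
--     # Handle direct_score and direct_nonlib_score pair
--     if "direct_score" in columns and "direct_nonlib_score" in columns:
--         direct_score_idx = columns.index("direct_score")
--         direct_nonlib_score_idx = columns.index("direct_nonlib_score")
--
--         # If they're not adjacent, move direct_nonlib_score right after direct_score
--         if direct_nonlib_score_idx != direct_score_idx + 1: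
--             # Remove direct_nonlib_score from its current position
--             columns.pop(direct_nonlib_score_idx)
--             # Insert it right after direct_score (adjust index if we removed from before)
--             insert_idx = direct_score_idx + 1
--             if direct_nonlib_score_idx < direct_score_idx:
--                 insert_idx = direct_score_idx  # direct_score index shifted down
--             columns.insert(insert_idx, "direct_nonlib_score")
--
--     # Handle frequency_score and frequency_nonlib_score pair
--     if "frequency_score" in columns and "frequency_nonlib_score" in columns:
--         frequency_score_idx = columns.index("frequency_score")
--         frequency_nonlib_score_idx = columns.index("frequency_nonlib_score")
--
--         # If they're not adjacent, move frequency_nonlib_score right after frequency_score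
--         if frequency_nonlib_score_idx != frequency_score_idx + 1:
--             # Remove frequency_nonlib_score from its current position
--             columns.pop(frequency_nonlib_score_idx)
--             # Insert it right after frequency_score (adjust index if we removed from before)
--             insert_idx = frequency_score_idx + 1
--             if frequency_nonlib_score_idx < frequency_score_idx:
--                 insert_idx = frequency_score_idx  # frequency_score index shifted down
--             columns.insert(insert_idx, "frequency_nonlib_score")
--
--     # Convert back to (position, column) pairs
--     return [(position, column) for position, column in enumerate(columns)]
-- ===== SOURCE B (Python) =====
-- def _place_adjacent(columns, score, nonlib):
--     """One forward pass: drop the first `nonlib` and re-emit it right after the first `score`."""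
--     if score not in columns or nonlib not in columns:
--         return columns
--     result = []
--     score_seen = nonlib_dropped = False
--     for c in columns:
--         if c == nonlib and not nonlib_dropped:
--             nonlib_dropped = True  # first occurrence: it is re-emitted next to its score column
--         elif c == score and not score_seen:
--             score_seen = True
--             result.append(c)
--             result.append(nonlib)
--         else:
--             result.append(c)
--     return result
--
--
-- def _enforce_score_pair_ordering(active_positions):
--     """Ensure that score pairs are placed next to each other in result_family_table"""
--     columns = [column for position, column in active_positions]
--     columns = _place_adjacent(columns, "direct_score", "direct_nonlib_score")
--     columns = _place_adjacent(columns, "frequency_score", "frequency_nonlib_score")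
--     return list(enumerate(columns))
-- ===== Notes on version B (the rewrite author's own statement) =====
-- stated objective: simpler
-- what changed: Replaces A's membership/index/pop/insert index arithmetic per pair with a single forward pass per pair that drops the first nonlib occurrence and re-emits it right after the first score occurrence, using two one-shot flags.
import Mathlib
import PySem

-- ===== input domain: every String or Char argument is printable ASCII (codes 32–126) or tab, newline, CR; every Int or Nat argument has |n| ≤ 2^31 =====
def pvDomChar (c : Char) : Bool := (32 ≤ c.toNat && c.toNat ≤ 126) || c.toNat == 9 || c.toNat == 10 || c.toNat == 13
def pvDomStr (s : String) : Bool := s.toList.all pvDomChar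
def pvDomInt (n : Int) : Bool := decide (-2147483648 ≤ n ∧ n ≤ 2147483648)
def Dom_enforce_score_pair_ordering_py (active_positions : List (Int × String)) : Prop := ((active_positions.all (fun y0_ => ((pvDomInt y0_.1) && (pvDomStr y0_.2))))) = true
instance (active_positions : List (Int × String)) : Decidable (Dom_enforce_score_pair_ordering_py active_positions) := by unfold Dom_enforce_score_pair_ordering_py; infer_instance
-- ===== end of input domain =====

-- B replaces A's index/pop/insert arithmetic with a single forward pass per pair (two one-shot flags); objective: simpler.


-- ===== PORT A =====
def enforce_score_pair_ordering_py (active_positions : List (Int × String)) : List (Int × String) :=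
  let columns := active_positions.map (fun pc => pc.2)
  let columns :=
    if columns.contains "direct_score" && columns.contains "direct_nonlib_score" then
      let direct_score_idx := (PySem.List.index? columns "direct_score").getD 0
      let direct_nonlib_score_idx := (PySem.List.index? columns "direct_nonlib_score").getD 0
      if direct_nonlib_score_idx ≠ direct_score_idx + 1 then
        let columns2 := ((PySem.List.pop? columns (direct_nonlib_score_idx : Int)).map Prod.snd).getD columns
        let insert_idx := if direct_nonlib_score_idx < direct_score_idx then direct_score_idx else direct_score_idx + 1
        PySem.List.insert columns2 (insert_idx : Int) "direct_nonlib_score"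
      else columns
    else columns
  let columns :=
    if columns.contains "frequency_score" && columns.contains "frequency_nonlib_score" then
      let frequency_score_idx := (PySem.List.index? columns "frequency_score").getD 0
      let frequency_nonlib_score_idx := (PySem.List.index? columns "frequency_nonlib_score").getD 0
      if frequency_nonlib_score_idx ≠ frequency_score_idx + 1 then
        let columns2 := ((PySem.List.pop? columns (frequency_nonlib_score_idx : Int)).map Prod.snd).getD columns
        let insert_idx := if frequency_nonlib_score_idx < frequency_score_idx then frequency_score_idx else frequency_score_idx + 1
        PySem.List.insert columns2 (insert_idx : Int) "frequency_nonlib_score"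
      else columns
    else columns
  PySem.List.enumerate columns 0

-- ===== PORT B =====
-- one forward pass: drop the first `nonlib`, re-emitting it right after the first `score`
def placeLoop (score nonlib : String) : List String → Bool → Bool → List String
  | [], _, _ => []
  | c :: rest, sSeen, nDropped =>
    if c == nonlib && !nDropped then placeLoop score nonlib rest sSeen true
    else if c == score && !sSeen then c :: nonlib :: placeLoop score nonlib rest true nDropped
    else c :: placeLoop score nonlib rest sSeen nDropped

def placeAdjacent (columns : List String) (score nonlib : String) : List String :=
  if !(columns.contains score) || !(columns.contains nonlib) then columns
  else placeLoop score nonlib columns false false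

def enforce_score_pair_ordering_py_alt (active_positions : List (Int × String)) : List (Int × String) :=
  let columns := active_positions.map (fun pc => pc.2)
  let columns := placeAdjacent columns "direct_score" "direct_nonlib_score"
  let columns := placeAdjacent columns "frequency_score" "frequency_nonlib_score"
  PySem.List.enumerate columns 0

-- ===== PRECONDITION & SPEC =====
def Spec_enforce_score_pair_ordering_py (active_positions : List (Int × String)) (out : List (Int × String)) : Prop := out = enforce_score_pair_ordering_py_alt active_positions
instance (active_positions : List (Int × String)) (out : List (Int × String)) : Decidable (Spec_enforce_score_pair_ordering_py active_positions out) := by unfold Spec_enforce_score_pair_ordering_py; infer_instance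

-- ===== CLAIM (what is proved, stated in full; the proofs are below) =====
def Claim_equal_enforce_score_pair_ordering_py : Prop := ∀ (active_positions : List (Int × String)), Dom_enforce_score_pair_ordering_py active_positions → Spec_enforce_score_pair_ordering_py active_positions (enforce_score_pair_ordering_py active_positions)

-- ===== LEMMAS AND PROOFS =====

-- A's per-pair block, as a named function (proof helper; the ports do not use it)
def aStep (s n : String) (columns : List String) : List String :=
  if columns.contains s && columns.contains n then
    let si := (PySem.List.index? columns s).getD 0
    let ni := (PySem.List.index? columns n).getD 0
    if ni ≠ si + 1 then
      let columns2 := ((PySem.List.pop? columns (ni : Int)).map Prod.snd).getD columns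
      let insert_idx := if ni < si then si else si + 1
      PySem.List.insert columns2 (insert_idx : Int) n
    else columns
  else columns

-- remove the first occurrence of n
def rmF (n : String) : List String → List String
  | [] => []
  | c :: t => if c = n then t else c :: rmF n t

-- insert n right after the first occurrence of s (no-op shape when s absent)
def insA (s n : String) : List String → List String
  | [] => []
  | c :: t => if c = s then c :: n :: t else c :: insA s n t

lemma portA_eq (ap : List (Int × String)) :
    enforce_score_pair_ordering_py ap =
      PySem.List.enumerate
        (aStep "frequency_score" "frequency_nonlib_score"
          (aStep "direct_score" "direct_nonlib_score" (ap.map (fun pc => pc.2)))) 0 := rfl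

lemma placeLoop_tt (s n : String) (l : List String) : placeLoop s n l true true = l := by
  induction l with
  | nil => rfl
  | cons c t ih => simp [placeLoop, ih]

lemma placeLoop_tf (s n : String) (l : List String) : placeLoop s n l true false = rmF n l := by
  induction l with
  | nil => rfl
  | cons c t ih =>
    by_cases h : c = n
    · simp [placeLoop, rmF, h, placeLoop_tt]
    · simp [placeLoop, rmF, h, ih]

lemma placeLoop_ft (s n : String) (l : List String) :
    placeLoop s n l false true = insA s n l := by
  induction l with
  | nil => rfl
  | cons c t ih =>
    by_cases h : c = s
    · simp [placeLoop, insA, h, placeLoop_tt]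
    · simp [placeLoop, insA, h, ih]

lemma rmF_eraseIdx (n : String) (l : List String) (k : Nat)
    (h : PySem.List.index? l n = some k) : l.eraseIdx k = rmF n l := by
  induction l generalizing k with
  | nil => simp [PySem.List.index?] at h
  | cons c t ih =>
    by_cases hc : c = n
    · subst hc
      rw [PySem.List.index?_cons_self] at h
      obtain rfl : k = 0 := by simpa using h.symm
      simp [rmF]
    · rw [PySem.List.index?_cons_of_ne t hc] at h
      obtain ⟨k', hk', rfl⟩ := Option.map_eq_some_iff.mp h
      simp [rmF, hc, ih k' hk']

lemma insA_take_drop (s n : String) (l : List String) (k : Nat)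
    (h : PySem.List.index? l s = some k) :
    insA s n l = l.take (k + 1) ++ n :: l.drop (k + 1) := by
  induction l generalizing k with
  | nil => simp [PySem.List.index?] at h
  | cons c t ih =>
    by_cases hc : c = s
    · subst hc
      rw [PySem.List.index?_cons_self] at h
      obtain rfl : k = 0 := by simpa using h.symm
      simp [insA]
    · rw [PySem.List.index?_cons_of_ne t hc] at h
      obtain ⟨k', hk', rfl⟩ := Option.map_eq_some_iff.mp h
      simp [insA, hc, ih k' hk']

lemma index?_lt_length {l : List String} {v : String} {k : Nat}
    (h : PySem.List.index? l v = some k) : k < l.length := by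
  obtain ⟨pre, suf, rfl, rfl, -⟩ := (PySem.List.index?_eq_some_iff l v k).mp h
  simp

lemma insert_cons_succ (c : String) (l : List String) (m : Nat) (v : String)
    (h : m ≤ l.length) :
    PySem.List.insert (c :: l) ((m + 1 : Nat) : Int) v = c :: PySem.List.insert l (m : Int) v := by
  rw [PySem.List.insert_natCast _ _ _ (by simpa using Nat.succ_le_succ h),
      PySem.List.insert_natCast _ _ _ h]
  simp

lemma insert_one_cons (c : String) (l : List String) (v : String) :
    PySem.List.insert (c :: l) ((1 : Nat) : Int) v = c :: v :: l := by
  rw [PySem.List.insert_natCast _ _ _ (by simp)]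
  simp

lemma ML (s n : String) (hsn : s ≠ n) :
    ∀ (l : List String), s ∈ l → n ∈ l → aStep s n l = placeLoop s n l false false := by
  intro l
  induction l with
  | nil => intro hs _; simp at hs
  | cons c t ih =>
    intro hs hn
    by_cases hcs : c = s
    · -- head is the score column
      subst hcs
      have hnt : n ∈ t := by
        rcases List.mem_cons.mp hn with h | h
        · exact absurd h.symm hsn
        · exact h
      obtain ⟨kn, hkn⟩ := Option.isSome_iff_exists.mp ((PySem.List.index?_isSome_iff t n).mpr hnt)
      have hknlt := index?_lt_length hkn
      have hkn' : PySem.List.index? (c :: t) n = some (kn + 1) := by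
        rw [PySem.List.index?_cons_of_ne t hsn, hkn]; rfl
      have hc1 : (c :: t).contains c = true := by simp
      have hc2 : (c :: t).contains n = true := by simp [hnt]
      simp only [aStep, hc1, hc2, Bool.and_self, if_true, PySem.List.index?_cons_self, hkn',
        Option.getD_some]
      by_cases hk0 : kn = 0
      · subst hk0
        obtain ⟨pre, suf, hdec, hlen, -⟩ := (PySem.List.index?_eq_some_iff t n 0).mp hkn
        obtain rfl : pre = [] := List.length_eq_zero_iff.mp hlen
        simp only [List.nil_append] at hdec
        subst hdec
        simp [placeLoop, hsn, placeLoop_tt]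
      · rw [if_pos (by omega : (kn + 1 : Nat) ≠ 0 + 1)]
        have hpop : PySem.List.pop? (c :: t) ((kn + 1 : Nat) : Int) =
            some ((c :: t)[kn + 1]'(by simpa using Nat.succ_lt_succ hknlt), c :: t.eraseIdx kn) := by
          rw [PySem.List.pop?_natCast _ _ (by simpa using Nat.succ_lt_succ hknlt)]
          simp
        rw [hpop]
        simp only [Option.map_some, Option.getD_some]
        rw [if_neg (by omega : ¬ (kn + 1 : Nat) < 0), show ((0 + 1 : Nat) : Int) = ((1 : Nat) : Int) by norm_num,
          insert_one_cons]
        simp [placeLoop, hsn, placeLoop_tf, rmF_eraseIdx n t kn hkn]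
    · by_cases hcn : c = n
      · -- head is the nonlib column
        subst hcn
        have hst : s ∈ t := by
          rcases List.mem_cons.mp hs with h | h
          · exact absurd h.symm hcs
          · exact h
        obtain ⟨ks, hks⟩ := Option.isSome_iff_exists.mp ((PySem.List.index?_isSome_iff t s).mpr hst)
        have hkslt := index?_lt_length hks
        have hks' : PySem.List.index? (c :: t) s = some (ks + 1) := by
          rw [PySem.List.index?_cons_of_ne t hcs, hks]; rfl
        have hc1 : (c :: t).contains s = true := by simp [hst]
        have hc2 : (c :: t).contains c = true := by simp
        simp only [aStep, hc1, hc2, Bool.and_self, if_true, PySem.List.index?_cons_self, hks',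
          Option.getD_some]
        rw [if_pos (by omega : (0 : Nat) ≠ (ks + 1) + 1)]
        rw [show ((0 : Nat) : Int) = (0 : Int) by norm_num, PySem.List.pop?_zero_cons]
        simp only [Option.map_some, Option.getD_some]
        rw [if_pos (by omega : (0 : Nat) < ks + 1)]
        rw [PySem.List.insert_natCast _ _ _ hkslt]
        have hloop : placeLoop s c (c :: t) false false = placeLoop s c t false true := by
          simp [placeLoop]
        rw [hloop, placeLoop_ft s c t, insA_take_drop s c t ks hks]
      · -- ordinary column: both targets are in the tail
        have hst : s ∈ t := by
          rcases List.mem_cons.mp hs with h | h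
          · exact absurd h.symm hcs
          · exact h
        have hnt : n ∈ t := by
          rcases List.mem_cons.mp hn with h | h
          · exact absurd h.symm hcn
          · exact h
        obtain ⟨ks, hks⟩ := Option.isSome_iff_exists.mp ((PySem.List.index?_isSome_iff t s).mpr hst)
        obtain ⟨kn, hkn⟩ := Option.isSome_iff_exists.mp ((PySem.List.index?_isSome_iff t n).mpr hnt)
        have hkslt := index?_lt_length hks
        have hknlt := index?_lt_length hkn
        have hks' : PySem.List.index? (c :: t) s = some (ks + 1) := by
          rw [PySem.List.index?_cons_of_ne t hcs, hks]; rfl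
        have hkn' : PySem.List.index? (c :: t) n = some (kn + 1) := by
          rw [PySem.List.index?_cons_of_ne t hcn, hkn]; rfl
        have hc1 : (c :: t).contains s = true := by simp [hst]
        have hc2 : (c :: t).contains n = true := by simp [hnt]
        have ht1 : t.contains s = true := by simp [hst]
        have ht2 : t.contains n = true := by simp [hnt]
        have hIH := ih hst hnt
        have hloop : placeLoop s n (c :: t) false false = c :: placeLoop s n t false false := by
          simp [placeLoop, hcs, hcn]
        rw [hloop, ← hIH]
        simp only [aStep, hc1, hc2, ht1, ht2, Bool.and_self, if_true, hks', hkn', hks, hkn,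
          Option.getD_some]
        by_cases hadj : kn = ks + 1
        · rw [if_neg (show ¬ (kn + 1 ≠ ks + 1 + 1) by omega),
              if_neg (show ¬ (kn ≠ ks + 1) by omega)]
        · rw [if_pos (show kn + 1 ≠ ks + 1 + 1 by omega),
              if_pos (show kn ≠ ks + 1 by omega)]
          have hpop : PySem.List.pop? (c :: t) ((kn + 1 : Nat) : Int) =
              some ((c :: t)[kn + 1]'(by simpa using Nat.succ_lt_succ hknlt), c :: t.eraseIdx kn) := by
            rw [PySem.List.pop?_natCast _ _ (by simpa using Nat.succ_lt_succ hknlt)]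
            simp
          have hpop' : PySem.List.pop? t ((kn : Nat) : Int) =
              some (t[kn]'hknlt, t.eraseIdx kn) := PySem.List.pop?_natCast _ _ hknlt
          rw [hpop, hpop']
          simp only [Option.map_some, Option.getD_some]
          have helen : (t.eraseIdx kn).length = t.length - 1 := by
            simp [List.length_eraseIdx, hknlt]
          obtain ⟨hb1, hes, -⟩ := PySem.List.getElem_of_index?_eq_some hks
          obtain ⟨hb2, hen, -⟩ := PySem.List.getElem_of_index?_eq_some hkn
          have hkns : kn ≠ ks := by
            intro h
            subst h
            rw [hes] at hen
            exact hsn hen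
          by_cases hlt : kn < ks
          · rw [if_pos (show kn + 1 < ks + 1 by omega), if_pos hlt]
            rw [insert_cons_succ c _ ks n (by rw [helen]; omega)]
          · rw [if_neg (show ¬ kn + 1 < ks + 1 by omega), if_neg hlt]
            rw [insert_cons_succ c _ (ks + 1) n (by rw [helen]; omega)]

lemma aStep_eq (s n : String) (hsn : s ≠ n) (l : List String) :
    aStep s n l = placeAdjacent l s n := by
  by_cases hs : s ∈ l
  · by_cases hn : n ∈ l
    · rw [ML s n hsn l hs hn]
      simp only [placeAdjacent]
      rw [if_neg (show ¬((!l.contains s || !l.contains n) = true) by simp [hs, hn])]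
    · simp only [aStep, placeAdjacent]
      rw [if_neg (show ¬((l.contains s && l.contains n) = true) by simp [hn]),
          if_pos (show (!l.contains s || !l.contains n) = true by simp [hn])]
  · simp only [aStep, placeAdjacent]
    rw [if_neg (show ¬((l.contains s && l.contains n) = true) by simp [hs]),
        if_pos (show (!l.contains s || !l.contains n) = true by simp [hs])]

-- ===== VERDICT (by name: the statement is the Claim_ definition above) =====
theorem enforce_score_pair_ordering_py_spec : Claim_equal_enforce_score_pair_ordering_py := by
  intro ap _
  unfold Spec_enforce_score_pair_ordering_py
  rw [portA_eq, aStep_eq _ _ (by decide), aStep_eq _ _ (by decide)]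
  rfl
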